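-- pv_equiv track=rewrite | github.com/risingfruition/AOC_2024 | d15.py | can_move_right
-- ===== SOURCE A (Python) =====
-- T_EMPTY = 0
--
-- T_WALL = 1
--
-- T_LEFT = 2
--
-- T_RIGHT = 3
--
-- def can_move_right(data, r, c, boxes):
--     spot = data[r][c+1]
--     if spot == T_EMPTY:
--         return True
--     if spot == T_WALL:
--         return False
--     if spot == T_LEFT:
--         if (r, c+1) in boxes:
--             raise ValueError("can move right box already added")
--         boxes.append((r, c+1))
--         return can_move_right(data, r, c+2, boxes)
--     if spot == T_RIGHT:
--         raise ValueError("Not possible to see T_RIGHT when moving right.")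
-- ===== SOURCE B (Python) =====
-- T_EMPTY = 0
-- T_WALL = 1
-- T_LEFT = 2
-- T_RIGHT = 3
--
-- def can_move_right(data, r, c, boxes):
--     row = data[r]
--     j = c + 1
--     while True:
--         spot = row[j]
--         if spot == T_LEFT:
--             if (r, j) in boxes:
--                 raise ValueError("can move right box already added")
--             boxes.append((r, j))
--             j += 2
--             continue
--         if spot == T_EMPTY:
--             return True
--         if spot == T_WALL:
--             return False
--         if spot == T_RIGHT:
--             raise ValueError("Not possible to see T_RIGHT when moving right.")
--         return None
-- ===== Notes on version B (the rewrite author's own statement) =====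
-- stated objective: simpler
-- what changed: The tail recursion is replaced by an explicit while-loop that hoists row = data[r] once and advances a column cursor, with the T_LEFT continuation handled first instead of last.
import Mathlib
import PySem

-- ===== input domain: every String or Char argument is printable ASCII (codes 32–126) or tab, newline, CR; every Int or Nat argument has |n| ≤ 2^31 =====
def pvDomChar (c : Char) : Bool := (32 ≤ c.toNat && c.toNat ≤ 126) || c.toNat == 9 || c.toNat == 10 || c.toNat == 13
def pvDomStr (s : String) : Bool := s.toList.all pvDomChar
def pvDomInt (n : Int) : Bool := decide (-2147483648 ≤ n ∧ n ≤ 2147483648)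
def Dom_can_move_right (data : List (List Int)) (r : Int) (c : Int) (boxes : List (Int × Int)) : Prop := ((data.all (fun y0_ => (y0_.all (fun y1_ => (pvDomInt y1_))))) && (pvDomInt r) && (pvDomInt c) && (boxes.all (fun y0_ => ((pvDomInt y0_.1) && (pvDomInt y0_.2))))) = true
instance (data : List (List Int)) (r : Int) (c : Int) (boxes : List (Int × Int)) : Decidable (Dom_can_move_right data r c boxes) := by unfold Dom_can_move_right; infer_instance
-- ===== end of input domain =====

-- B replaces A's tail recursion by an explicit while-loop that hoists row = data[r] once and
-- advances a column cursor, with the T_LEFT continuation handled first (objective: simpler).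
-- Both A and B append the traversed box positions to `boxes` in place, in the same order;
-- the equivalence proved here is about the return value.

-- ===== PORT A =====
-- Literal port of A's recursion; Python's raises (ValueError/IndexError) and the implicit
-- `return None` become the junk value `false`, excluded by Pre_can_move_right.
def can_move_right (data : List (List Int)) (r : Int) (c : Int) (boxes : List (Int × Int)) : Bool :=
  match h1 : PySem.List.pyGet? data r with
  | none => false                                   -- data[r] IndexError
  | some row =>
    match h2 : PySem.List.pyGet? row (c + 1) with
    | none => false                                 -- data[r][c+1] IndexError
    | some spot =>
      if spot = 0 then true
      else if spot = 1 then false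
      else if spot = 2 then
        if (r, c + 1) ∈ boxes then false            -- raise ValueError
        else can_move_right data r (c + 2) (boxes ++ [(r, c + 1)])
      else false                                    -- spot = 3 raise / implicit None
termination_by (((PySem.List.pyGetD data r []).length : Int) - c).toNat
decreasing_by
  have hrow : PySem.List.pyGetD data r [] = row := by
    simp [PySem.List.pyGetD, h1]
  have hin : ¬ (PySem.List.pyGet? row (c + 1) = none) := by simp [h2]
  rw [PySem.List.pyGet?_eq_none_iff] at hin
  have h3 : -(row.length : Int) ≤ c + 1 ∧ c + 1 < row.length := by
    by_contra hc
    exact hin (by simpa [PySem.Raise.InRange] using hc)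
  rw [hrow]
  omega

-- ===== PORT B =====
-- the `while True` loop of B: cursor j over the hoisted row
def cmrLoop (row : List Int) (r : Int) (j : Int) (boxes : List (Int × Int)) : Bool :=
  match h : PySem.List.pyGet? row j with
  | none => false                                   -- row[j] IndexError
  | some spot =>
    if spot = 2 then
      if (r, j) ∈ boxes then false                  -- raise ValueError
      else cmrLoop row r (j + 2) (boxes ++ [(r, j)])
    else if spot = 0 then true
    else if spot = 1 then false
    else false                                      -- spot = 3 raise / return None
termination_by ((row.length : Int) - j).toNat
decreasing_by
  have hin : ¬ (PySem.List.pyGet? row j = none) := by simp [h]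
  rw [PySem.List.pyGet?_eq_none_iff] at hin
  have h3 : -(row.length : Int) ≤ j ∧ j < row.length := by
    by_contra hc
    exact hin (by simpa [PySem.Raise.InRange] using hc)
  omega

def can_move_right_alt (data : List (List Int)) (r : Int) (c : Int) (boxes : List (Int × Int)) : Bool :=
  match PySem.List.pyGet? data r with
  | none => false
  | some row => cmrLoop row r (c + 1) boxes

-- ===== PRECONDITION & SPEC =====
-- Pre_: exactly the inputs where the Python A returns a bool — r indexes data (Python
-- negative-index semantics), and from column c+1 a run of k cells read as T_LEFT (none of
-- those positions already in boxes) ends at a cell read as T_EMPTY or T_WALL; everything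
-- else makes A raise (IndexError/ValueError) or return None, which is not a bool.
def Pre_can_move_right (data : List (List Int)) (r : Int) (c : Int) (boxes : List (Int × Int)) : Prop :=
  -(data.length : Int) ≤ r ∧ r < data.length ∧
  ∃ k, k < (PySem.List.pyGetD data r []).length + 1 ∧
    (∀ i, i < k →
      PySem.List.pyGet? (PySem.List.pyGetD data r []) (c + 1 + 2 * (i : Int)) = some 2 ∧
      ¬ ((r, c + 1 + 2 * (i : Int)) ∈ boxes)) ∧
    (PySem.List.pyGet? (PySem.List.pyGetD data r []) (c + 1 + 2 * (k : Int)) = some 0 ∨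
     PySem.List.pyGet? (PySem.List.pyGetD data r []) (c + 1 + 2 * (k : Int)) = some 1)
instance (data : List (List Int)) (r : Int) (c : Int) (boxes : List (Int × Int)) : Decidable (Pre_can_move_right data r c boxes) := by unfold Pre_can_move_right; infer_instance

def pvWitness_can_move_right : List (List Int) × Int × Int × (List (Int × Int)) := ([[0]], 0, -1, [])

def Spec_can_move_right (data : List (List Int)) (r : Int) (c : Int) (boxes : List (Int × Int)) (out : Bool) : Prop := out = can_move_right_alt data r c boxes
instance (data : List (List Int)) (r : Int) (c : Int) (boxes : List (Int × Int)) (out : Bool) : Decidable (Spec_can_move_right data r c boxes out) := by unfold Spec_can_move_right; infer_instance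

-- ===== CLAIM (what is proved, stated in full; the proofs are below) =====
def Claim_equal_can_move_right : Prop := ∀ (data : List (List Int)) (r : Int) (c : Int) (boxes : List (Int × Int)), Dom_can_move_right data r c boxes → Pre_can_move_right data r c boxes → Spec_can_move_right data r c boxes (can_move_right data r c boxes)

-- ===== LEMMAS AND PROOFS =====

-- the two recursions compute the same bool on EVERY input (junk branches included)
lemma can_move_right_eq_loop (m : Nat) :
    ∀ (data : List (List Int)) (r : Int) (row : List Int) (c : Int) (boxes : List (Int × Int)),
      PySem.List.pyGet? data r = some row →
      ((row.length : Int) - c).toNat ≤ m →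
      can_move_right data r c boxes = cmrLoop row r (c + 1) boxes := by
  induction m with
  | zero =>
    intro data r row c boxes h1 hm
    rw [can_move_right, cmrLoop, h1]
    split
    · next hx => exact nomatch hx
    · next row' hx =>
      injection hx with hx
      subst hx
      split
      · rfl
      · next spot h2 =>
        have hin : ¬ (PySem.List.pyGet? row (c + 1) = none) := by simp [h2]
        rw [PySem.List.pyGet?_eq_none_iff] at hin
        have hr : -(row.length : Int) ≤ c + 1 ∧ c + 1 < row.length := by
          by_contra hc
          exact hin (by simpa [PySem.Raise.InRange] using hc)
        omega
  | succ n ih =>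
    intro data r row c boxes h1 hm
    rw [can_move_right, cmrLoop, h1]
    split
    · next hx => exact nomatch hx
    · next row' hx =>
      injection hx with hx
      subst hx
      split
      · rfl
      · next spot h2 =>
        by_cases hs2 : spot = 2
        · subst hs2
          by_cases hb : (r, c + 1) ∈ boxes
          · simp [hb]
          · have hin : ¬ (PySem.List.pyGet? row (c + 1) = none) := by simp [h2]
            rw [PySem.List.pyGet?_eq_none_iff] at hin
            have hr : -(row.length : Int) ≤ c + 1 ∧ c + 1 < row.length := by
              by_contra hc
              exact hin (by simpa [PySem.Raise.InRange] using hc)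
            have heq := ih data r row (c + 2) (boxes ++ [(r, c + 1)]) h1 (by omega)
            rw [show (c : Int) + 1 + 2 = c + 2 + 1 from by ring]
            simp [hb, heq]
        · by_cases h0 : spot = 0
          · simp [h0]
          · by_cases hw : spot = 1
            · simp [hw]
            · simp [hs2, h0, hw]

lemma can_move_right_total_eq (data : List (List Int)) (r : Int) (c : Int) (boxes : List (Int × Int)) :
    can_move_right data r c boxes = can_move_right_alt data r c boxes := by
  unfold can_move_right_alt
  cases h1 : PySem.List.pyGet? data r with
  | none => rw [can_move_right, h1]
  | some row =>
    exact can_move_right_eq_loop ((row.length : Int) - c).toNat data r row c boxes h1 le_rfl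

-- ===== VERDICT (by name: the statement is the Claim_ definition above) =====
theorem can_move_right_spec : Claim_equal_can_move_right := by
  intro data r c boxes _ _
  unfold Spec_can_move_right
  exact can_move_right_total_eq data r c boxes
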